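-- pv_equiv track=rewrite | github.com/KazukiNoSuzaku/Leetcode | Python/1183_Maximum_Number_of_Ones.py | maximumNumberOfOnes
-- ===== SOURCE A (Python) =====
-- def maximumNumberOfOnes(width, height, sideLength, maxOnes):
--     """
--     :type width: int
--     :type height: int
--     :type sideLength: int
--     :type maxOnes: int
--     :rtype: int
--     """
--     counts = []
--     for i in range(sideLength):
--         for j in range(sideLength):
--             # Count how many sideLength x sideLength submatrices include position (i,j)
--             rows = (height - 1 - i) // sideLength + 1
--             cols = (width - 1 - j) // sideLength + 1
--             counts.append(rows * cols)
--     counts.sort(reverse=True)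
--     return sum(counts[:maxOnes])
-- ===== SOURCE B (Python) =====
-- def maximumNumberOfOnes(width, height, sideLength, maxOnes):
--     if sideLength <= 0:
--         return 0
--     s = sideLength
--     qh, rh = divmod(height, s)
--     qw, rw = divmod(width, s)
--     # Row counts take only two values: qh+1 (for rh residues) and qh (for s-rh);
--     # likewise columns. So the s*s cell weights form just four buckets.
--     buckets = [
--         ((qh + 1) * (qw + 1), rh * rw),
--         ((qh + 1) * qw, rh * (s - rw)),
--         (qh * (qw + 1), (s - rh) * rw),
--         (qh * qw, (s - rh) * (s - rw)),
--     ]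
--     buckets.sort(key=lambda vc: vc[0], reverse=True)
--     counts = []
--     for value, cnt in buckets:
--         counts.extend([value] * cnt)
--     return sum(counts[:maxOnes])
-- ===== Notes on version B (the rewrite author's own statement) =====
-- stated objective: faster
-- what changed: B replaces A's s*s double loop and full sort of s^2 cell weights by a closed-form 2x2 bucket decomposition: row and column tile-counts each take only two values, so B computes the four (value, multiplicity) buckets with two divmods, sorts just those four pairs, and expands them into the already-descending list before slicing.
import Mathlib
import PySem

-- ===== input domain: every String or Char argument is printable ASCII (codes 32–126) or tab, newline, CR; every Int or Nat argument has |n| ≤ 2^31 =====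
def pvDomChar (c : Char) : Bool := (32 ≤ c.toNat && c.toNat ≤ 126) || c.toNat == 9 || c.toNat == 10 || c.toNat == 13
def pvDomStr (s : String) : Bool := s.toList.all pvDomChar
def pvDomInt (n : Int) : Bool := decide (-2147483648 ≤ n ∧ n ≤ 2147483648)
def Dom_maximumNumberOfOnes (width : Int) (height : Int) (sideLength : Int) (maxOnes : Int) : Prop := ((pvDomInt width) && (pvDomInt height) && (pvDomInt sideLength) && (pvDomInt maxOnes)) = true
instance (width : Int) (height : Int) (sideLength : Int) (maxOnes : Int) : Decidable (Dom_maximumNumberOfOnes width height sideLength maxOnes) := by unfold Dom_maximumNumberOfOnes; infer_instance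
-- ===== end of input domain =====

-- B replaces A's s*s double loop + full sort by a closed-form 2x2 bucket decomposition:
-- row/column counts take only two values each, so B builds the four (value, multiplicity)
-- buckets in O(1), sorts just those four, and expands them into the already-sorted list.


-- ===== PORT A =====
-- counts.append(x) in the double loop is ported as cons-accumulate plus one final
-- reverse (the same list built in order); counts.sort(reverse=True) — a stable
-- descending sort of Ints — is ported as the stable List.mergeSort with relation
-- (b <= a), which is Python-exact here (equal keys are identical values).
def maximumNumberOfOnes (width : Int) (height : Int) (sideLength : Int) (maxOnes : Int) : Int :=
  let counts : List Int :=
    ((PySem.List.pyRange 0 sideLength 1).foldl (fun counts i =>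
      (PySem.List.pyRange 0 sideLength 1).foldl (fun counts j =>
        let rows := PySem.Int.floordiv (height - 1 - i) sideLength + 1
        let cols := PySem.Int.floordiv (width - 1 - j) sideLength + 1
        rows * cols :: counts) counts) []).reverse
  let counts := counts.mergeSort (fun a b => decide (b ≤ a))
  (PySem.List.slice counts none (some maxOnes)).foldl (· + ·) 0

-- ===== PORT B =====
-- divmod(h, s) is (PySem.Int.floordiv h s, PySem.Int.mod h s); buckets.sort(key=.., reverse=True)
-- is PySem.List.sorted with the value key; [value] * cnt is PySem.List.pyRepeat;
-- sum(...) is ported in both programs as the left fold it is in Python (stack-safe).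
def maximumNumberOfOnes_alt (width : Int) (height : Int) (sideLength : Int) (maxOnes : Int) : Int :=
  if sideLength ≤ 0 then 0
  else
    let s := sideLength
    let qh := PySem.Int.floordiv height s
    let rh := PySem.Int.mod height s
    let qw := PySem.Int.floordiv width s
    let rw := PySem.Int.mod width s
    let buckets : List (Int × Int) :=
      [((qh + 1) * (qw + 1), rh * rw),
       ((qh + 1) * qw,       rh * (s - rw)),
       (qh * (qw + 1),       (s - rh) * rw),
       (qh * qw,             (s - rh) * (s - rw))]
    let buckets := PySem.List.sorted buckets (fun vc => vc.1) true
    let counts := buckets.foldl (fun acc vc => acc ++ PySem.List.pyRepeat [vc.1] vc.2) []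
    (PySem.List.slice counts none (some maxOnes)).foldl (· + ·) 0

-- ===== PRECONDITION & SPEC =====
def Spec_maximumNumberOfOnes (width : Int) (height : Int) (sideLength : Int) (maxOnes : Int) (out : Int) : Prop := out = maximumNumberOfOnes_alt width height sideLength maxOnes
instance (width : Int) (height : Int) (sideLength : Int) (maxOnes : Int) (out : Int) : Decidable (Spec_maximumNumberOfOnes width height sideLength maxOnes out) := by unfold Spec_maximumNumberOfOnes; infer_instance

-- ===== CLAIM (what is proved, stated in full; the proofs are below) =====
def Claim_equal_maximumNumberOfOnes : Prop := ∀ (width : Int) (height : Int) (sideLength : Int) (maxOnes : Int), Dom_maximumNumberOfOnes width height sideLength maxOnes → Spec_maximumNumberOfOnes width height sideLength maxOnes (maximumNumberOfOnes width height sideLength maxOnes)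

-- ===== LEMMAS AND PROOFS =====

-- expansion of a (value, multiplicity) bucket list
def pvExpand (bl : List (Int × Int)) : List Int := bl.flatMap (fun vc => List.replicate vc.2.toNat vc.1)

-- a foldl that conses one value per element builds the reversed map
theorem pv_foldl_cons_singleton (h : Int → Int) (ys : List Int) (acc : List Int) :
    ys.foldl (fun a j => h j :: a) acc = (ys.map h).reverse ++ acc := by
  induction ys generalizing acc with
  | nil => simp
  | cons y ys ih => simp [List.foldl_cons, ih]

-- a foldl that prepends one reversed block per element builds the reversed flatMap
theorem pv_foldl_rev_block (g : Int → List Int) (xs : List Int) (acc : List Int) :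
    xs.foldl (fun a i => (g i).reverse ++ a) acc = (xs.flatMap g).reverse ++ acc := by
  induction xs generalizing acc with
  | nil => simp
  | cons x xs ih => simp [List.foldl_cons, ih]

-- A's fused double loop builds exactly the outer product of the two count tables
theorem pv_counts_eq (width height sideLength : Int) :
    ((PySem.List.pyRange 0 sideLength 1).foldl (fun counts i =>
      (PySem.List.pyRange 0 sideLength 1).foldl (fun counts j =>
        let rows := PySem.Int.floordiv (height - 1 - i) sideLength + 1
        let cols := PySem.Int.floordiv (width - 1 - j) sideLength + 1
        rows * cols :: counts) counts) []).reverse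
    = ((PySem.List.pyRange 0 sideLength 1).map (fun i => PySem.Int.floordiv (height - 1 - i) sideLength + 1)).flatMap
        (fun r => ((PySem.List.pyRange 0 sideLength 1).map (fun j => PySem.Int.floordiv (width - 1 - j) sideLength + 1)).map
          (fun c => r * c)) := by
  simp only [pv_foldl_cons_singleton]
  rw [pv_foldl_rev_block
    (fun i => (PySem.List.pyRange 0 sideLength 1).map
      (fun j => (PySem.Int.floordiv (height - 1 - i) sideLength + 1) *
                (PySem.Int.floordiv (width - 1 - j) sideLength + 1)))]
  simp [List.flatMap_map, List.map_map, Function.comp_def]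

-- the count table collapses to two constant blocks (the bucket decomposition)
theorem pv_table_eq (h s : Int) (hs : 0 < s) :
    (PySem.List.pyRange 0 s 1).map (fun i => PySem.Int.floordiv (h - 1 - i) s + 1)
    = List.replicate (PySem.Int.mod h s).toNat (PySem.Int.floordiv h s + 1)
      ++ List.replicate (s - PySem.Int.mod h s).toNat (PySem.Int.floordiv h s) := by
  have hr0 := PySem.Int.mod_nonneg h hs
  have hrs := PySem.Int.mod_lt h hs
  have e := PySem.Int.floordiv_mul_add_mod h s
  have hval : ∀ i : Int, 0 ≤ i → i < s →
      PySem.Int.floordiv (h - 1 - i) s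
        = (if i < PySem.Int.mod h s then PySem.Int.floordiv h s else PySem.Int.floordiv h s - 1) := by
    intro i h0 hi
    split_ifs with hc
    · rw [PySem.Int.floordiv_eq_iff_of_pos hs]
      have e2 : (PySem.Int.floordiv h s + 1) * s = PySem.Int.floordiv h s * s + s := by ring
      exact ⟨by linarith, by rw [e2]; linarith⟩
    · rw [not_lt] at hc
      rw [PySem.Int.floordiv_eq_iff_of_pos hs]
      have e3 : (PySem.Int.floordiv h s - 1) * s = PySem.Int.floordiv h s * s - s := by ring
      have e4 : (PySem.Int.floordiv h s - 1 + 1) * s = PySem.Int.floordiv h s * s := by ring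
      exact ⟨by rw [e3]; linarith, by rw [e4]; linarith⟩
  rw [PySem.List.pyRange_one_append 0 (PySem.Int.mod h s) s hr0 (le_of_lt hrs), List.map_append]
  congr 1
  · rw [List.map_congr_left (g := fun _ => PySem.Int.floordiv h s + 1)
      (fun i hi => by
        rw [PySem.List.mem_pyRange_one] at hi
        rw [hval i hi.1 (lt_trans hi.2 hrs), if_pos hi.2])]
    simp [List.map_const', PySem.List.length_pyRange_one]
  · rw [List.map_congr_left (g := fun _ => PySem.Int.floordiv h s)
      (fun i hi => by
        rw [PySem.List.mem_pyRange_one] at hi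
        rw [hval i (le_trans hr0 hi.1) hi.2, if_neg (not_lt.2 hi.1)]
        ring)]
    simp [List.map_const', PySem.List.length_pyRange_one]

-- membership in an expansion
theorem pv_mem_expand {bl : List (Int × Int)} {x : Int} (hx : x ∈ pvExpand bl) :
    ∃ vc ∈ bl, x = vc.1 := by
  simp only [pvExpand, List.mem_flatMap, List.mem_replicate] at hx
  obtain ⟨vc, hvc, _, rfl⟩ := hx
  exact ⟨vc, hvc, rfl⟩

-- expanding a value-descending bucket list yields a descending list
theorem pv_expand_pairwise {bl : List (Int × Int)}
    (h : bl.Pairwise (fun p q => q.1 ≤ p.1)) :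
    (pvExpand bl).Pairwise (fun a b => b ≤ a) := by
  induction bl with
  | nil => simp [pvExpand]
  | cons p bl ih =>
    rw [List.pairwise_cons] at h
    simp only [pvExpand, List.flatMap_cons]
    rw [List.pairwise_append]
    refine ⟨List.pairwise_replicate.2 (Or.inr le_rfl), ih h.2, ?_⟩
    intro a ha b hb
    obtain ⟨-, rfl⟩ := (List.mem_replicate.1 ha)
    obtain ⟨vc, hvc, rfl⟩ := pv_mem_expand hb
    exact h.1 vc hvc

-- a permutation of bucket lists expands to a permutation
theorem pv_expand_perm {bl₁ bl₂ : List (Int × Int)} (h : bl₁.Perm bl₂) :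
    (pvExpand bl₁).Perm (pvExpand bl₂) :=
  h.flatMap (fun _ _ => List.Perm.refl _)

-- swap the middle two of four appended blocks
theorem pv_middle_swap (A B C D : List Int) :
    ((A ++ B) ++ (C ++ D)).Perm ((A ++ C) ++ (B ++ D)) := by
  simp only [List.append_assoc]
  exact List.Perm.append_left A (List.perm_append_comm_assoc B C D)

-- one replicated row expands to two replicated product blocks (up to permutation)
theorem pv_flat_perm1 (b c d : Nat) (y p q : Int) :
    ((List.replicate b y).flatMap
      (fun r => List.replicate c (r * p) ++ List.replicate d (r * q))).Perm
    (List.replicate (b * c) (y * p) ++ List.replicate (b * d) (y * q)) := by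
  induction b with
  | zero => simp
  | succ b ih =>
    rw [List.replicate_succ, List.flatMap_cons]
    refine (List.Perm.append_left _ ih).trans ?_
    refine (pv_middle_swap _ _ _ _).trans ?_
    have h1 : (b + 1) * c = c + b * c := by ring
    have h2 : (b + 1) * d = d + b * d := by ring
    rw [h1, h2, List.replicate_add, List.replicate_add]

-- the full outer product of two two-block tables, as a permutation of four blocks
theorem pv_flat_perm (a b c d : Nat) (x y p q : Int) :
    ((List.replicate a x ++ List.replicate b y).flatMap
      (fun r => List.replicate c (r * p) ++ List.replicate d (r * q))).Perm
    (List.replicate (a * c) (x * p) ++ List.replicate (a * d) (x * q)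
      ++ List.replicate (b * c) (y * p) ++ List.replicate (b * d) (y * q)) := by
  rw [List.flatMap_append]
  simpa only [List.append_assoc] using
    (pv_flat_perm1 a c d x p q).append (pv_flat_perm1 b c d y p q)

-- the outer product of the two collapsed tables is a permutation of the expanded buckets
theorem pv_product_perm (qh rh qw rw s : Int) (hrh : 0 ≤ rh) (hrw : 0 ≤ rw)
    (hrhs : rh ≤ s) (hrws : rw ≤ s) :
    ((List.replicate rh.toNat (qh + 1) ++ List.replicate (s - rh).toNat qh).flatMap
      (fun r => (List.replicate rw.toNat (qw + 1) ++ List.replicate (s - rw).toNat qw).map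
        (fun c => r * c))).Perm
    (pvExpand [((qh + 1) * (qw + 1), rh * rw),
               ((qh + 1) * qw,       rh * (s - rw)),
               (qh * (qw + 1),       (s - rh) * rw),
               (qh * qw,             (s - rh) * (s - rw))]) := by
  obtain ⟨a, rfl⟩ : ∃ a : Nat, rh = (a : Int) := ⟨rh.toNat, (Int.toNat_of_nonneg hrh).symm⟩
  obtain ⟨c, rfl⟩ : ∃ c : Nat, rw = (c : Int) := ⟨rw.toNat, (Int.toNat_of_nonneg hrw).symm⟩
  obtain ⟨b, hb⟩ : ∃ b : Nat, s - (a : Int) = (b : Int) :=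
    ⟨(s - (a : Int)).toNat, (Int.toNat_of_nonneg (by omega)).symm⟩
  obtain ⟨d, hd⟩ : ∃ d : Nat, s - (c : Int) = (d : Int) :=
    ⟨(s - (c : Int)).toNat, (Int.toNat_of_nonneg (by omega)).symm⟩
  rw [hb, hd]
  simp only [pvExpand, List.flatMap_cons, List.flatMap_nil, List.append_nil,
    List.map_append, List.map_replicate, ← Nat.cast_mul, Int.toNat_natCast]
  simp only [← List.append_assoc]
  exact pv_flat_perm a b c d (qh + 1) qh (qw + 1) qw

-- ===== VERDICT (by name: the statement is the Claim_ definition above) =====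
theorem maximumNumberOfOnes_spec : Claim_equal_maximumNumberOfOnes := by
  unfold Claim_equal_maximumNumberOfOnes
  intro width height sideLength maxOnes _
  unfold Spec_maximumNumberOfOnes maximumNumberOfOnes maximumNumberOfOnes_alt
  by_cases hs : sideLength ≤ 0
  · rw [if_pos hs, PySem.List.pyRange_one_eq_nil hs]
    simp [List.mergeSort_nil, PySem.List.slice]
  · rw [if_neg hs]
    have hs' : 0 < sideLength := by omega
    have hr0h := PySem.Int.mod_nonneg height hs'
    have hrsh := PySem.Int.mod_lt height hs'
    have hr0w := PySem.Int.mod_nonneg width hs'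
    have hrsw := PySem.Int.mod_lt width hs'
    simp only [PySem.List.pyRepeat_singleton, PySem.List.foldl_append_eq_flatMap,
      List.nil_append]
    rw [pv_counts_eq, pv_table_eq height sideLength hs', pv_table_eq width sideLength hs']
    refine congrArg (fun l => List.foldl (· + ·) (0:Int) l)
      (congrArg (fun l => PySem.List.slice l none (some maxOnes)) ?_)
    apply PySem.List.eq_of_perm_of_pairwise_le_of_injective (key := fun x : Int => -x)
      neg_injective
    · exact (List.mergeSort_perm _ _).trans
        ((pv_product_perm (PySem.Int.floordiv height sideLength) (PySem.Int.mod height sideLength)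
            (PySem.Int.floordiv width sideLength) (PySem.Int.mod width sideLength) sideLength
            hr0h hr0w (le_of_lt hrsh) (le_of_lt hrsw)).trans
          (pv_expand_perm (PySem.List.sorted_perm _ _ _).symm))
    · exact (List.pairwise_mergeSort (le := fun a b : Int => decide (b ≤ a))
        (fun a b c hab hbc => by simp_all; omega)
        (fun a b => by simp; omega) _).imp (fun hab => by simp_all)
    · exact (pv_expand_pairwise (PySem.List.sorted_pairwise_rev _ _)).imp (fun hab => by omega)
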